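-- pv_equiv track=rewrite | github.com/haerxeong/Algorithm | 백준/Gold/17609. 회문/회문.py | check
-- ===== SOURCE A (Python) =====
-- def is_palindrome(s, left, right):
--     while left < right:
--         if s[left] != s[right]:
--             return False
--         left += 1
--         right -= 1
--     return True
--
-- def check(s):
--     left, right = 0, len(s) - 1
--     while left < right:
--         if s[left] != s[right]:
--             if is_palindrome(s, left + 1, right) or is_palindrome(s, left, right - 1):
--                 return 1
--             else:
--                 return 2
--         left += 1
--         right -= 1
--     return 0
-- ===== SOURCE B (Python) =====
-- def check(s):
--     # 0 if s is a palindrome; else 1 if deleting some single character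
--     # makes it a palindrome (brute force over all deletion positions); else 2.
--     if s == s[::-1]:
--         return 0
--     if any((t := s[:i] + s[i+1:]) == t[::-1] for i in range(len(s))):
--         return 1
--     return 2
-- ===== Notes on version B (the rewrite author's own statement) =====
-- stated objective: alternative
-- what changed: Replaces A's two-pointer scan to the first mismatch with a whole-string reversal test followed by a brute-force enumeration that tries deleting every single position and tests each candidate by reversal equality; correctness rests on the lemma that a one-deletion palindrome fix, if any exists, can always be made at the first mismatching pair.
import Mathlib
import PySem

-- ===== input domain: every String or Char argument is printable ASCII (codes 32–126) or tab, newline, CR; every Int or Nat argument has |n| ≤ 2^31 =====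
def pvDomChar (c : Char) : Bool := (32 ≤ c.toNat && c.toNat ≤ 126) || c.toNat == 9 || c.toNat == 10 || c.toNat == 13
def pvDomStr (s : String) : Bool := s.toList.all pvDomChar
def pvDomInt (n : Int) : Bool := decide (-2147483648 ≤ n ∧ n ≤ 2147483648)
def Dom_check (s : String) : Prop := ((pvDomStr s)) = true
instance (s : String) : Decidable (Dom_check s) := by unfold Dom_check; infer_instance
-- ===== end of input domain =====

-- B drops A's two-pointer first-mismatch scan for a whole-string reversal test plus a
-- brute-force try of every single-character deletion (alternative algorithm, O(n^2); not faster).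

-- ===== PORT A =====
-- is_palindrome(s, left, right): the two-pointer helper loop
def palA (cs : List Char) (left right : Int) : Bool :=
  if left < right then
    if PySem.List.pyGetD cs left ' ' != PySem.List.pyGetD cs right ' ' then false
    else palA cs (left + 1) (right - 1)
  else true
termination_by (right - left).toNat
decreasing_by omega

-- the while-loop of check
def loopA (cs : List Char) (left right : Int) : Int :=
  if left < right then
    if PySem.List.pyGetD cs left ' ' != PySem.List.pyGetD cs right ' ' then
      if palA cs (left + 1) right || palA cs left (right - 1) then 1 else 2
    else loopA cs (left + 1) (right - 1)
  else 0
termination_by (right - left).toNat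
decreasing_by omega

def check (s : String) : Int :=
  loopA s.toList 0 (PySem.List.len s.toList - 1)

-- ===== PORT B =====
def check_alt (s : String) : Int :=
  let cs := s.toList
  if cs = cs.reverse then 0                        -- s == s[::-1]
  else if (List.range cs.length).any (fun i =>     -- any(... for i in range(len(s)))
      let t := PySem.List.slice cs none (some (i : Int)) ++
               PySem.List.slice cs (some ((i : Int) + 1)) none   -- t = s[:i] + s[i+1:]
      t == t.reverse)                              -- t == t[::-1]
    then 1 else 2

-- ===== PRECONDITION & SPEC =====
def Spec_check (s : String) (out : Int) : Prop := out = check_alt s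
instance (s : String) (out : Int) : Decidable (Spec_check s out) := by unfold Spec_check; infer_instance

-- ===== CLAIM (what is proved, stated in full; the proofs are below) =====
def Claim_equal_check : Prop := ∀ (s : String), Dom_check s → Spec_check s (check s)

-- ===== LEMMAS AND PROOFS =====

-- the inclusive segment cs[a..b] as drop/take
def seg (cs : List Char) (a b : Nat) : List Char := (cs.drop a).take (b + 1 - a)

-- s[:i] + s[i+1:]
def del (cs : List Char) (i : Nat) : List Char := cs.take i ++ cs.drop (i + 1)

theorem seg_decomp (cs : List Char) (a b : Nat) (hab : a < b) (hb : b < cs.length) :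
    seg cs a b = cs[a] :: (seg cs (a + 1) (b - 1) ++ [cs[b]]) := by
  unfold seg
  rw [List.drop_eq_getElem_cons (by omega)]
  have h1 : b + 1 - a = (b - a - 1) + 1 + 1 := by omega
  have h2 : b - 1 + 1 - (a + 1) = b - a - 1 := by omega
  rw [h1, h2, List.take_succ_cons, List.take_add_one]
  rw [List.getElem?_drop]
  have he : a + 1 + (b - a - 1) = b := by omega
  rw [he, List.getElem?_eq_getElem hb]
  rfl

theorem pal_cons_append (x y : Char) (m : List Char) :
    (x :: (m ++ [y]) = (x :: (m ++ [y])).reverse) ↔ (x = y ∧ m = m.reverse) := by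
  simp [List.reverse_append]
  intro h _
  exact h.symm

-- palA computes reversal-equality of the inclusive segment
theorem palA_aux (cs : List Char) (d : Nat) : ∀ a b : Nat, b + 1 - a ≤ d → b < cs.length →
    palA cs a b = decide (seg cs a b = (seg cs a b).reverse) := by
  induction d with
  | zero =>
    intro a b hd hb
    rw [palA]
    rw [if_neg (by exact_mod_cast by omega : ¬ ((a:Int) < (b:Int)))]
    have : seg cs a b = [] := by unfold seg; rw [show b + 1 - a = 0 by omega]; simp
    simp [this]
  | succ d ih =>
    intro a b hd hb
    by_cases hab : a < b
    · have hga : PySem.List.pyGetD cs (a : Int) ' ' = cs[a] := by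
        rw [PySem.List.pyGetD_natCast, List.getD_eq_getElem _ _ (by omega)]
      have hgb : PySem.List.pyGetD cs (b : Int) ' ' = cs[b] := by
        rw [PySem.List.pyGetD_natCast, List.getD_eq_getElem _ _ hb]
      rw [palA, if_pos (by exact_mod_cast hab), hga, hgb]
      rw [seg_decomp cs a b hab hb]
      by_cases hc : cs[a] = cs[b]
      · rw [if_neg (by simp [hc])]
        have c1 : (a : Int) + 1 = ((a + 1 : Nat) : Int) := by push_cast; ring
        have c2 : (b : Int) - 1 = ((b - 1 : Nat) : Int) := by omega
        rw [c1, c2, ih (a+1) (b-1) (by omega) (by omega)]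
        simp only [pal_cons_append, hc, true_and]
      · rw [if_pos (by simp [hc])]
        exact (decide_eq_false (fun h => hc ((pal_cons_append _ _ _).mp h).1)).symm
    · rw [palA, if_neg (by exact_mod_cast hab)]
      by_cases hab' : a = b
      · subst hab'
        have : seg cs a a = [cs[a]] := by
          unfold seg
          rw [show a + 1 - a = 1 by omega, List.drop_eq_getElem_cons hb]
          rfl
        simp [this]
      · have : seg cs a b = [] := by unfold seg; rw [show b + 1 - a = 0 by omega]; simp
        simp [this]

-- pointwise (getD) characterisation of reversal-equality
theorem pal_iff_getD (cs : List Char) :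
    cs = cs.reverse ↔ ∀ j < cs.length, cs.getD j ' ' = cs.getD (cs.length - 1 - j) ' ' := by
  constructor
  · intro h j hj
    rw [List.getD_eq_getElem _ _ hj, List.getD_eq_getElem _ _ (by omega)]
    rw [List.getElem_of_eq h, List.getElem_reverse]
  · intro h
    apply List.ext_getElem (by simp)
    intro i h1 h2
    rw [List.getElem_reverse]
    have := h i h1
    rwa [List.getD_eq_getElem _ _ h1, List.getD_eq_getElem _ _ (by omega)] at this

-- the half-range condition suffices
theorem pal_of_half (cs : List Char)
    (h : ∀ j, j < cs.length → 2 * j + 1 ≤ cs.length →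
        cs.getD j ' ' = cs.getD (cs.length - 1 - j) ' ') : cs = cs.reverse := by
  apply (pal_iff_getD cs).mpr
  intro j hj
  by_cases h2 : 2 * j + 1 ≤ cs.length
  · exact h j hj h2
  · have := h (cs.length - 1 - j) (by omega) (by omega)
    rw [show cs.length - 1 - (cs.length - 1 - j) = j by omega] at this
    exact this.symm

theorem del_length (cs : List Char) (i : Nat) (hi : i < cs.length) :
    (del cs i).length = cs.length - 1 := by
  unfold del; simp; omega

theorem del_getD (cs : List Char) (i j : Nat) (hi : i < cs.length) (hj : j < cs.length - 1) :
    (del cs i).getD j ' ' = if j < i then cs.getD j ' ' else cs.getD (j + 1) ' ' := by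
  unfold del
  by_cases h : j < i
  · rw [if_pos h, List.getD_append _ _ _ _ (by simp; omega)]
    rw [List.getD_eq_getElem _ _ (by simp; omega), List.getD_eq_getElem _ _ (by omega)]
    simp
  · rw [if_neg h]
    rw [List.getD_append_right _ _ _ _ (by simp; omega)]
    rw [List.getD_eq_getElem _ _ (by simp; omega), List.getD_eq_getElem _ _ (by omega)]
    simp
    congr 1
    omega

theorem seg_length (cs : List Char) (a b : Nat) (hb : b < cs.length) :
    (seg cs a b).length = b + 1 - a := by
  unfold seg; simp; omega

theorem seg_getD (cs : List Char) (a b k : Nat) (hb : b < cs.length) (hk : k < b + 1 - a) :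
    (seg cs a b).getD k ' ' = cs.getD (a + k) ' ' := by
  unfold seg
  rw [List.getD_eq_getElem _ _ (by simp; omega), List.getD_eq_getElem _ _ (by omega)]
  simp

-- KEY LEMMA, forward: a working deletion at any position forces one of the two
-- candidates at the first mismatch (l, n-1-l) to be a palindrome.
theorem del_to_seg (cs : List Char) (l i : Nat)
    (hl2 : 2 * l + 2 ≤ cs.length)
    (_hpre : ∀ j < l, cs.getD j ' ' = cs.getD (cs.length - 1 - j) ' ')
    (hne : cs.getD l ' ' ≠ cs.getD (cs.length - 1 - l) ' ')
    (hi : i < cs.length)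
    (hp : del cs i = (del cs i).reverse) :
    seg cs (l + 1) (cs.length - 1 - l) = (seg cs (l + 1) (cs.length - 1 - l)).reverse ∨
    seg cs l (cs.length - 1 - l - 1) = (seg cs l (cs.length - 1 - l - 1)).reverse := by
  have n := cs.length
  have hpt : ∀ j < cs.length - 1,
      (del cs i).getD j ' ' = (del cs i).getD (cs.length - 1 - 1 - j) ' ' := by
    intro j hj
    have := (pal_iff_getD (del cs i)).mp hp j (by rw [del_length cs i hi]; omega)
    rwa [del_length cs i hi] at this
  by_cases hil : i ≤ l
  · -- deletion in the left part ⇒ inner candidate seg (l+1) (n-1-l) is a palindrome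
    left
    apply pal_of_half
    intro k hk hk2
    rw [seg_length cs _ _ (by omega)] at hk hk2 ⊢
    rw [seg_getD cs _ _ _ (by omega) (by omega), seg_getD cs _ _ _ (by omega) (by omega)]
    -- need cs[l+1+k] = cs[(n-1-l) - k] ; use hpt at j = l + k
    have h1 := hpt (l + k) (by omega)
    rw [del_getD cs i _ hi (by omega), del_getD cs i _ hi (by omega)] at h1
    rw [if_neg (by omega), if_neg (by omega)] at h1
    rw [show l + k + 1 = l + 1 + k by omega] at h1
    rw [show cs.length - 1 - 1 - (l + k) + 1 = cs.length - 1 - l - k by omega] at h1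
    rw [h1]
    congr 1
    omega
  · by_cases hir : cs.length - 1 - l ≤ i
    · -- deletion in the right part ⇒ the other candidate seg l (n-1-l-1) is a palindrome
      right
      apply pal_of_half
      intro k hk hk2
      rw [seg_length cs _ _ (by omega)] at hk hk2 ⊢
      rw [seg_getD cs _ _ _ (by omega) (by omega), seg_getD cs _ _ _ (by omega) (by omega)]
      -- need cs[l+k] = cs[(n-2-l) - k] ; use hpt at j = l + k
      have h1 := hpt (l + k) (by omega)
      rw [del_getD cs i _ hi (by omega), del_getD cs i _ hi (by omega)] at h1
      rw [if_pos (by omega), if_pos (by omega)] at h1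
      rw [h1]
      congr 1
      omega
    · -- deletion strictly between the mismatching pair: contradiction with cs[l] ≠ cs[n-1-l]
      exfalso
      have h1 := hpt l (by omega)
      rw [del_getD cs i _ hi (by omega), del_getD cs i _ hi (by omega)] at h1
      rw [if_pos (by omega), if_neg (by omega)] at h1
      rw [show cs.length - 1 - 1 - l + 1 = cs.length - 1 - l by omega] at h1
      exact hne h1

-- KEY LEMMA, backward: if the inner candidate at (l, n-1-l) is a palindrome then
-- deleting position l works; symmetrically for the other candidate and position n-1-l.
theorem seg_to_del_left (cs : List Char) (l : Nat)
    (hl2 : 2 * l + 2 ≤ cs.length)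
    (hpre : ∀ j < l, cs.getD j ' ' = cs.getD (cs.length - 1 - j) ' ')
    (hs : seg cs (l + 1) (cs.length - 1 - l) = (seg cs (l + 1) (cs.length - 1 - l)).reverse) :
    del cs l = (del cs l).reverse := by
  have hl : l < cs.length := by omega
  apply pal_of_half
  intro j hj hj2
  rw [del_length cs l hl] at hj hj2 ⊢
  rw [del_getD cs l _ hl (by omega), del_getD cs l _ hl (by omega)]
  by_cases h1 : j < l
  · rw [if_pos h1, if_neg (by omega)]
    rw [show cs.length - 1 - 1 - j + 1 = cs.length - 1 - j by omega]
    exact hpre j h1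
  · rw [if_neg h1, if_neg (by omega)]
    have hsp := (pal_iff_getD _).mp hs (j - l) (by rw [seg_length cs _ _ (by omega)]; omega)
    rw [seg_length cs _ _ (by omega)] at hsp
    rw [seg_getD cs _ _ _ (by omega) (by omega), seg_getD cs _ _ _ (by omega) (by omega)] at hsp
    rw [show l + 1 + (j - l) = j + 1 by omega] at hsp
    rw [show l + 1 + (cs.length - 1 - l + 1 - (l + 1) - 1 - (j - l)) = cs.length - 1 - 1 - j + 1 by omega] at hsp
    exact hsp

theorem seg_to_del_right (cs : List Char) (l : Nat)
    (hl2 : 2 * l + 2 ≤ cs.length)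
    (hpre : ∀ j < l, cs.getD j ' ' = cs.getD (cs.length - 1 - j) ' ')
    (hs : seg cs l (cs.length - 1 - l - 1) = (seg cs l (cs.length - 1 - l - 1)).reverse) :
    del cs (cs.length - 1 - l) = (del cs (cs.length - 1 - l)).reverse := by
  have hr : cs.length - 1 - l < cs.length := by omega
  apply pal_of_half
  intro j hj hj2
  rw [del_length cs _ hr] at hj hj2 ⊢
  rw [del_getD cs _ _ hr (by omega), del_getD cs _ _ hr (by omega)]
  rw [if_pos (by omega)]
  by_cases h1 : j < l
  · rw [if_neg (by omega)]
    rw [show cs.length - 1 - 1 - j + 1 = cs.length - 1 - j by omega]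
    exact hpre j h1
  · rw [if_pos (by omega)]
    have hsp := (pal_iff_getD _).mp hs (j - l) (by rw [seg_length cs _ _ (by omega)]; omega)
    rw [seg_length cs _ _ (by omega)] at hsp
    rw [seg_getD cs _ _ _ (by omega) (by omega), seg_getD cs _ _ _ (by omega) (by omega)] at hsp
    rw [show l + (j - l) = j by omega] at hsp
    rw [show l + (cs.length - 1 - l - 1 + 1 - l - 1 - (j - l)) = cs.length - 1 - 1 - j by omega] at hsp
    exact hsp

-- A returns 0 on palindromes (loop runs to the middle)
theorem loopA_pal_aux (cs : List Char)
    (hpal : ∀ j < cs.length, cs.getD j ' ' = cs.getD (cs.length - 1 - j) ' ') (d : Nat) :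
    ∀ i : Nat, cs.length - i ≤ d → loopA cs i ((cs.length : Int) - 1 - i) = 0 := by
  induction d with
  | zero =>
    intro i hi
    rw [loopA, if_neg (by omega)]
  | succ d ih =>
    intro i hi
    by_cases hlt : (i : Int) < (cs.length : Int) - 1 - i
    · have hin : i < cs.length := by omega
      have hri : ((cs.length : Int) - 1 - i) = ((cs.length - 1 - i : Nat) : Int) := by omega
      have hgb : PySem.List.pyGetD cs ((cs.length : Int) - 1 - i) ' ' = cs.getD (cs.length - 1 - i) ' ' := by
        rw [hri, PySem.List.pyGetD_natCast]
      have hga : PySem.List.pyGetD cs (i : Int) ' ' = cs.getD i ' ' := PySem.List.pyGetD_natCast cs i ' '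
      rw [loopA, if_pos hlt, hga, hgb, if_neg (by rw [hpal i hin]; simp)]
      have c1 : (i : Int) + 1 = ((i + 1 : Nat) : Int) := by push_cast; ring
      have c2 : (cs.length : Int) - 1 - i - 1 = (cs.length : Int) - 1 - ((i + 1 : Nat) : Int) := by
        push_cast; ring
      rw [c1, c2]
      exact ih (i + 1) (by omega)
    · rw [loopA, if_neg hlt]

-- A's loop walks unchanged up to the first mismatch
theorem loopA_walk (cs : List Char) (l : Nat)
    (h : ∀ j < l, cs.getD j ' ' = cs.getD (cs.length - 1 - j) ' ') (hl : l < cs.length / 2) (d : Nat) :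
    ∀ i : Nat, l - i ≤ d → i ≤ l →
      loopA cs i ((cs.length : Int) - 1 - i) = loopA cs l ((cs.length : Int) - 1 - l) := by
  induction d with
  | zero =>
    intro i hd hi
    have : i = l := by omega
    rw [this]
  | succ d ih =>
    intro i hd hi
    by_cases hil : i = l
    · rw [hil]
    · have hin : i < cs.length := by omega
      have hlt : (i : Int) < (cs.length : Int) - 1 - i := by
        have := Nat.div_mul_le_self cs.length 2
        omega
      have hga : PySem.List.pyGetD cs (i : Int) ' ' = cs.getD i ' ' := PySem.List.pyGetD_natCast cs i ' '
      have hri : ((cs.length : Int) - 1 - i) = ((cs.length - 1 - i : Nat) : Int) := by omega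
      have hgb : PySem.List.pyGetD cs ((cs.length : Int) - 1 - i) ' ' = cs.getD (cs.length - 1 - i) ' ' := by
        rw [hri, PySem.List.pyGetD_natCast]
      rw [loopA, if_pos hlt, hga, hgb, if_neg (by rw [h i (by omega)]; simp)]
      have c1 : (i : Int) + 1 = ((i + 1 : Nat) : Int) := by push_cast; ring
      have c2 : (cs.length : Int) - 1 - i - 1 = (cs.length : Int) - 1 - ((i + 1 : Nat) : Int) := by
        push_cast; ring
      rw [c1, c2]
      exact ih (i + 1) (by omega) (by omega)

theorem find?_range_some {p : Nat → Bool} {m l : Nat} (h : (List.range m).find? p = some l) :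
    l < m ∧ p l = true ∧ ∀ j < l, p j = false := by
  obtain ⟨hp, as, bs, heq, hall⟩ := List.find?_eq_some_iff_append.mp h
  have hlm : l < m := by
    have : l ∈ List.range m := by rw [heq]; exact List.mem_append_right _ (List.mem_cons_self)
    simp at this
    exact this
  refine ⟨hlm, hp, ?_⟩
  have htake : List.take as.length (List.range m) = as := by
    rw [heq]; simp
  have hlen : m = as.length + (bs.length + 1) := by
    have := congrArg List.length heq; simp at this; exact this
  have hmin : min as.length m = as.length := by omega
  have hasl : as = List.range as.length := by
    conv_lhs => rw [← htake]
    rw [List.take_range, hmin]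
  have hl_eq : l = as.length := by
    have := congrArg (fun t => t[as.length]?) heq
    simp [List.getElem?_range (show as.length < m by omega)] at this
    exact this.symm
  intro j hj
  have : j ∈ as := by
    rw [hasl]
    simp
    omega
  simpa using hall j this

-- B's candidate for i, written with the slice primitives, is del
theorem cand_eq_del (cs : List Char) (i : Nat) :
    PySem.List.slice cs none (some (i : Int)) ++
      PySem.List.slice cs (some ((i : Int) + 1)) none = del cs i := by
  rw [PySem.List.slice_to_natCast]
  rw [show (i : Int) + 1 = ((i + 1 : Nat) : Int) by push_cast; ring]
  rw [PySem.List.slice_from_natCast]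
  rfl

-- main list-level equality
theorem check_eq_list (cs : List Char) :
    loopA cs 0 ((cs.length : Int) - 1) =
      (if cs = cs.reverse then 0
       else if (List.range cs.length).any (fun i =>
          let t := PySem.List.slice cs none (some (i : Int)) ++
                   PySem.List.slice cs (some ((i : Int) + 1)) none
          t == t.reverse)
        then 1 else 2 : Int) := by
  by_cases hpal : cs = cs.reverse
  · rw [if_pos hpal]
    simpa using loopA_pal_aux cs (fun j hj => (pal_iff_getD cs).mp hpal j hj) cs.length 0 (by omega)
  · rw [if_neg hpal]
    -- locate the first mismatch l (it exists since cs is not a palindrome)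
    cases hfind : (List.range (cs.length / 2)).find?
        (fun i => cs.getD i ' ' != cs.getD (cs.length - 1 - i) ' ') with
    | none =>
      exfalso
      apply hpal
      apply pal_of_half
      intro j hj hj2
      by_cases h3 : cs.length - 1 - j = j
      · rw [h3]
      · have hj' : j < cs.length / 2 := by omega
        have := List.find?_eq_none.mp hfind j (by simpa using hj')
        simpa using this
    | some l =>
      obtain ⟨hlm, hpl, hprev⟩ := find?_range_some hfind
      have hl2 : 2 * l + 2 ≤ cs.length := by omega
      have hne : cs.getD l ' ' ≠ cs.getD (cs.length - 1 - l) ' ' := by simpa using hpl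
      have hpre : ∀ j < l, cs.getD j ' ' = cs.getD (cs.length - 1 - j) ' ' := by
        intro j hj
        have := hprev j hj
        simpa using this
      -- drive A's loop to the mismatch
      have hA : loopA cs 0 ((cs.length : Int) - 1) = loopA cs l ((cs.length : Int) - 1 - l) := by
        simpa using loopA_walk cs l hpre hlm l 0 (by omega) (by omega)
      rw [hA]
      have hlt : (l : Int) < (cs.length : Int) - 1 - l := by omega
      have hga : PySem.List.pyGetD cs (l : Int) ' ' = cs.getD l ' ' := PySem.List.pyGetD_natCast cs l ' '
      have hri : ((cs.length : Int) - 1 - l) = ((cs.length - 1 - l : Nat) : Int) := by omega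
      have hgb : PySem.List.pyGetD cs ((cs.length : Int) - 1 - l) ' ' = cs.getD (cs.length - 1 - l) ' ' := by
        rw [hri, PySem.List.pyGetD_natCast]
      rw [loopA, if_pos hlt, hga, hgb, if_pos (by simpa using hne)]
      have e1 : (l : Int) + 1 = ((l + 1 : Nat) : Int) := by push_cast; ring
      have e3 : ((cs.length - 1 - l : Nat) : Int) - 1 = ((cs.length - 1 - l - 1 : Nat) : Int) := by omega
      rw [e1, hri, e3]
      rw [palA_aux cs (cs.length + 2) (l + 1) (cs.length - 1 - l) (by omega) (by omega)]
      rw [palA_aux cs (cs.length + 2) l (cs.length - 1 - l - 1) (by omega) (by omega)]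
      -- both sides are if-expressions over equivalent conditions
      have hiff :
          (seg cs (l + 1) (cs.length - 1 - l) = (seg cs (l + 1) (cs.length - 1 - l)).reverse ∨
           seg cs l (cs.length - 1 - l - 1) = (seg cs l (cs.length - 1 - l - 1)).reverse) ↔
          ((List.range cs.length).any (fun i =>
            let t := PySem.List.slice cs none (some (i : Int)) ++
                     PySem.List.slice cs (some ((i : Int) + 1)) none
            t == t.reverse) = true) := by
        constructor
        · intro h
          rw [List.any_eq_true]
          rcases h with h | h
          · exact ⟨l, by simp [List.mem_range]; omega,
              by simp only [cand_eq_del, beq_iff_eq]; exact seg_to_del_left cs l hl2 hpre h⟩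
          · exact ⟨cs.length - 1 - l, by simp [List.mem_range]; omega,
              by simp only [cand_eq_del, beq_iff_eq]; exact seg_to_del_right cs l hl2 hpre h⟩
        · intro h
          rw [List.any_eq_true] at h
          obtain ⟨i, hi, hp⟩ := h
          simp only [cand_eq_del, beq_iff_eq] at hp
          exact del_to_seg cs l i hl2 hpre hne (by simpa using hi) hp
      by_cases hc : seg cs (l + 1) (cs.length - 1 - l) = (seg cs (l + 1) (cs.length - 1 - l)).reverse ∨
          seg cs l (cs.length - 1 - l - 1) = (seg cs l (cs.length - 1 - l - 1)).reverse
      · rw [if_pos ((Bool.or_eq_true _ _).mpr (hc.imp decide_eq_true decide_eq_true)),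
          if_pos (hiff.mp hc)]
      · rw [not_or] at hc
        rw [if_neg (by simp only [Bool.or_eq_true, decide_eq_true_eq, not_or]; exact hc),
          if_neg (by rw [← hiff]; rw [not_or]; exact hc)]

-- ===== VERDICT (by name: the statement is the Claim_ definition above) =====
theorem check_spec : Claim_equal_check := by
  intro s _
  unfold Spec_check check check_alt
  simp only [PySem.List.len_eq]
  exact check_eq_list s.toList
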